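-- pv_equiv track=rewrite | github.com/kho903/python_algorithms | programmers/level1/약수의 개수와 덧셈.py | solution
-- ===== SOURCE A (Python) =====
-- def solution(left, right):
--     answer = 0
--     square = []
--     for i in range(32):
--         square.append(i ** 2)
--     for i in range(left, right + 1):
--         if i in square:
--             answer -= i
--         else:
--             answer += i
--     return answer
-- ===== SOURCE B (Python) =====
-- def solution(left, right):
--     # closed-form range sum; each perfect square s in [left, right] flips sign: -2*s correction
--     total = (left + right) * (right - left + 1) // 2 if left <= right else 0
--     for i in range(32):
--         s = i * i
--         if left <= s <= right:
--             total -= 2 * s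
--     return total
-- ===== Notes on version B (the rewrite author's own statement) =====
-- stated objective: faster
-- what changed: Replaces the element-by-element scan of [left, right] (with a 32-element list membership test per element) by the closed-form range sum plus a fixed 32-iteration correction of -2*s for each square s=i*i (i<32) lying in the range.
import Mathlib
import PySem

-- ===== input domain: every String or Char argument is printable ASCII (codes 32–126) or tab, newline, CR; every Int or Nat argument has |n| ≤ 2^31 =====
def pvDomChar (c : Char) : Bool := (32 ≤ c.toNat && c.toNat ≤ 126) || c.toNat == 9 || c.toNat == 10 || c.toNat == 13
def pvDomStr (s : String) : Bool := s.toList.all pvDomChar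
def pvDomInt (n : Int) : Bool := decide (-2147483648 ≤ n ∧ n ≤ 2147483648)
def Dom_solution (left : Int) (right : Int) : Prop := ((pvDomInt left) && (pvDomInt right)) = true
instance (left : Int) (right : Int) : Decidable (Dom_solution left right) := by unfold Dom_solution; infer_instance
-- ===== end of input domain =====

-- B replaces A's element-by-element scan of [left,right] by the closed-form range sum
-- plus a fixed 32-term correction for the squares; equivalence is proved for all inputs.

-- ===== PORT A =====
def solution (left : Int) (right : Int) : Int :=
  let square : List Int := (PySem.List.pyRange 0 32 1).foldl (fun acc i => acc ++ [i ^ 2]) []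
  (PySem.List.pyRange left (right + 1) 1).foldl
    (fun answer i => if i ∈ square then answer - i else answer + i) 0

-- ===== PORT B =====
def solution_alt (left : Int) (right : Int) : Int :=
  let total : Int :=
    if left ≤ right then PySem.Int.floordiv ((left + right) * (right - left + 1)) 2 else 0
  (PySem.List.pyRange 0 32 1).foldl
    (fun total i => if left ≤ i * i ∧ i * i ≤ right then total - 2 * (i * i) else total) total

-- ===== PRECONDITION & SPEC =====
def Spec_solution (left : Int) (right : Int) (out : Int) : Prop := out = solution_alt left right
instance (left : Int) (right : Int) (out : Int) : Decidable (Spec_solution left right out) := by unfold Spec_solution; infer_instance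

-- ===== CLAIM (what is proved, stated in full; the proofs are below) =====
def Claim_equal_solution : Prop := ∀ (left : Int) (right : Int), Dom_solution left right → Spec_solution left right (solution left right)

-- ===== LEMMAS AND PROOFS =====

-- the fixed list of the 32 squares both programs use
def sqL : List Int := [0,1,4,9,16,25,36,49,64,81,100,121,144,169,196,225,256,289,324,361,400,441,484,529,576,625,676,729,784,841,900,961]

-- closed-form range sum (B's first line)
def rS (left right : Int) : Int :=
  if left ≤ right then PySem.Int.floordiv ((left + right) * (right - left + 1)) 2 else 0

-- filtered-square sum
def fS (left right : Int) : Int :=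
  (sqL.filter (fun s => decide (left ≤ s ∧ s ≤ right))).sum

lemma squareA_eq : (PySem.List.pyRange 0 32 1).foldl (fun acc i => acc ++ [i ^ 2]) [] = sqL := by
  decide

lemma A_eval (left right : Int) :
    solution left right =
      ((PySem.List.pyRange left (right + 1) 1).map (fun i => if i ∈ sqL then -i else i)).sum := by
  show (PySem.List.pyRange left (right + 1) 1).foldl
      (fun answer i => if i ∈ ((PySem.List.pyRange 0 32 1).foldl (fun acc i => acc ++ [i ^ 2]) []) then answer - i else answer + i) 0 = _
  rw [squareA_eq]
  have hf : (fun (a i : Int) => if i ∈ sqL then a - i else a + i)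
      = (fun (a i : Int) => a + (if i ∈ sqL then -i else i)) := by
    funext a i; by_cases h : i ∈ sqL <;> simp [h] <;> ring
  rw [hf, PySem.List.foldl_add]
  simp

lemma B_fold (left right : Int) : ∀ (l : List Int) (t : Int),
    l.foldl (fun t s => if left ≤ s ∧ s ≤ right then t - 2 * s else t) t
      = t - 2 * (l.filter (fun s => decide (left ≤ s ∧ s ≤ right))).sum := by
  intro l
  induction l with
  | nil => intro t; simp
  | cons a l ih =>
      intro t
      by_cases h : left ≤ a ∧ a ≤ right <;> simp [List.foldl_cons, h, ih] <;> ring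

lemma B_eval (left right : Int) :
    solution_alt left right = rS left right - 2 * fS left right := by
  show (PySem.List.pyRange 0 32 1).foldl
      (fun total i => if left ≤ i * i ∧ i * i ≤ right then total - 2 * (i * i) else total)
      (rS left right) = _
  have hmap : (PySem.List.pyRange 0 32 1).map (fun i => i * i) = sqL := by decide
  calc (PySem.List.pyRange 0 32 1).foldl
        (fun total i => if left ≤ i * i ∧ i * i ≤ right then total - 2 * (i * i) else total)
        (rS left right)
      = ((PySem.List.pyRange 0 32 1).map (fun i => i * i)).foldl
        (fun total s => if left ≤ s ∧ s ≤ right then total - 2 * s else total)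
        (rS left right) := by rw [List.foldl_map]
    _ = rS left right - 2 * fS left right := by rw [hmap, B_fold]; rfl

-- rS grows by right when right is appended to the range
lemma rS_step (left right : Int) (h : left ≤ right) :
    rS left right = rS left (right - 1) + right := by
  rcases eq_or_lt_of_le h with heq | hlt
  · subst heq
    unfold rS
    rw [if_pos le_rfl, if_neg (by omega)]
    have he : (left + left) * (left - left + 1) = left * 2 := by ring
    rw [he, PySem.Int.floordiv_eq_iff_of_pos (by omega : (0:Int) < 2)]
    omega
  · unfold rS
    rw [if_pos h, if_pos (by omega : left ≤ right - 1)]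
    have hev : Even ((left + right - 1) * (right - left)) := by
      rcases Int.even_or_odd (right - left) with he | ho
      · exact he.mul_left _
      · rcases ho with ⟨m, hm⟩
        have : Even (left + right - 1) := ⟨left + m, by omega⟩
        exact this.mul_right _
    rcases hev with ⟨k, hk⟩
    have h1 : (left + right) * (right - left + 1) = 2 * (k + right) := by linear_combination hk
    have h2 : (left + (right - 1)) * (right - 1 - left + 1) = 2 * k := by linear_combination hk
    rw [h1, h2]
    have e1 : PySem.Int.floordiv (2 * (k + right)) 2 = k + right :=
      (PySem.Int.floordiv_eq_iff_of_pos (by omega : (0:Int) < 2)).mpr (by omega)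
    have e2 : PySem.Int.floordiv (2 * k) 2 = k :=
      (PySem.Int.floordiv_eq_iff_of_pos (by omega : (0:Int) < 2)).mpr (by omega)
    rw [e1, e2]

-- filtered-square sum grows by right exactly when right is a listed square
lemma filt_step (left right : Int) (h : left ≤ right) :
    ∀ (l : List Int), l.Nodup →
      (l.filter (fun s => decide (left ≤ s ∧ s ≤ right))).sum
        = (l.filter (fun s => decide (left ≤ s ∧ s ≤ right - 1))).sum
          + (if right ∈ l then right else 0) := by
  intro l
  induction l with
  | nil => simp
  | cons a t ih =>
      intro hnd
      rcases List.nodup_cons.mp hnd with ⟨hna, hndt⟩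
      by_cases ha : a = right
      · subst ha
        have hmt : a ∉ t := hna
        rw [List.filter_cons, List.filter_cons]
        simp only [decide_eq_true_eq]
        rw [if_pos (by omega : left ≤ a ∧ a ≤ a), if_neg (by omega : ¬(left ≤ a ∧ a ≤ a - 1))]
        have := ih hndt
        simp [hmt] at this ⊢
        omega
      · rw [List.filter_cons, List.filter_cons]
        have hmem : (right ∈ a :: t) ↔ (right ∈ t) := by
          simp [List.mem_cons, Ne.symm ha]
        rw [if_congr hmem rfl rfl]
        by_cases hp : left ≤ a ∧ a ≤ right
        · have hp1 : left ≤ a ∧ a ≤ right - 1 := ⟨hp.1, by omega⟩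
          simp only [decide_eq_true_eq, if_pos hp, if_pos hp1, List.sum_cons]
          rw [ih hndt]
          ring
        · have hp1 : ¬(left ≤ a ∧ a ≤ right - 1) := by omega
          simp only [decide_eq_true_eq, if_neg hp, if_neg hp1]
          rw [ih hndt]

lemma sqL_nodup : sqL.Nodup := by decide

lemma fS_step (left right : Int) (h : left ≤ right) :
    fS left right = fS left (right - 1) + (if right ∈ sqL then right else 0) := by
  unfold fS
  exact filt_step left right h sqL sqL_nodup

lemma main_sum (left : Int) : ∀ (n : Nat) (right : Int), (right + 1 - left).toNat = n →
    ((PySem.List.pyRange left (right + 1) 1).map (fun i => if i ∈ sqL then -i else i)).sum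
      = rS left right - 2 * fS left right := by
  intro n
  induction n with
  | zero =>
      intro right hn
      have hlt : right < left := by omega
      have hr : PySem.List.pyRange left (right + 1) 1 = [] := by
        rw [PySem.List.pyRange_one]
        have : (right + 1 - left).toNat = 0 := hn
        rw [this]; rfl
      have hf : sqL.filter (fun s => decide (left ≤ s ∧ s ≤ right)) = [] :=
        List.filter_eq_nil_iff.mpr (fun s _ => by simp; omega)
      rw [hr]
      unfold rS fS
      rw [if_neg (by omega), hf]
      simp
  | succ n ih =>
      intro right hn
      have hlr : left ≤ right := by omega
      rw [PySem.List.pyRange_one_succ_right hlr, List.map_append, List.sum_append]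
      have hre : right - 1 + 1 = right := by ring
      have ihr := ih (right - 1) (by omega)
      rw [hre] at ihr
      rw [ihr, rS_step left right hlr, fS_step left right hlr]
      by_cases hm : right ∈ sqL <;> simp [hm] <;> ring

-- ===== VERDICT (by name: the statement is the Claim_ definition above) =====
theorem solution_spec : Claim_equal_solution := by
  intro left right _
  unfold Spec_solution
  rw [A_eval, B_eval, main_sum left (right + 1 - left).toNat right rfl]
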